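-- pv_equiv track=rewrite | github.com/boisvert4427/poker-2 | src/poker_tracker/pure_live_detector.py | _assign_player_names
-- ===== SOURCE A (Python) =====
-- def _assign_player_names(candidates: list[str]) -> dict[str, str]:
--     filtered = [candidate for candidate in candidates if candidate]
--     if len(filtered) >= 3:
--         return {
--             "top_left": filtered[0],
--             "top_right": filtered[1],
--             "right": filtered[2],
--         }
--     if len(filtered) == 2:
--         return {
--             "top_left": filtered[0],
--             "right": filtered[1],
--         }
--     if len(filtered) == 1:
--         return {"top_left": filtered[0]}
--     return {}
-- ===== SOURCE B (Python) =====
-- def _assign_player_names(candidates: list[str]) -> dict[str, str]: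
--     result: dict[str, str] = {}
--     for name in candidates:
--         if not name:
--             continue
--         if "top_left" not in result:
--             result["top_left"] = name
--         elif "right" not in result:
--             result["right"] = name
--         else:
--             result = {"top_left": result["top_left"],
--                       "top_right": result["right"],
--                       "right": name}
--             break
--     return result
-- ===== Notes on version B (the rewrite author's own statement) =====
-- stated objective: alternative
-- what changed: Replaced filter-then-branch-on-count by a single online pass: a state machine that fills the dict incrementally per nonempty name, promotes the old 'right' entry to 'top_right' when a third name arrives, and breaks early without ever building the filtered list.
import Mathlib
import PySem

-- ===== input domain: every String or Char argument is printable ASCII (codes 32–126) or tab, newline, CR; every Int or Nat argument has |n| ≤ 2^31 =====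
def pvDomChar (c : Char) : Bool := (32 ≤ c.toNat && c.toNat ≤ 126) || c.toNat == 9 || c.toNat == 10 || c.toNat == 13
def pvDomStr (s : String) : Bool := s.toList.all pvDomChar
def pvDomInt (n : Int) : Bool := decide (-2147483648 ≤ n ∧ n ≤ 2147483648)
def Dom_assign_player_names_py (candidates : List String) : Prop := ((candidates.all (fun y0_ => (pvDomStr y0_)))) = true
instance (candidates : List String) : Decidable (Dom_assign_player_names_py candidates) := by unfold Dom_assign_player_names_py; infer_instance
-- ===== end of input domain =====

-- B replaces A's filter-then-branch by a single online pass with a dict-building state machine and early exit (alternative decomposition, same cost).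


-- ===== PORT A =====
-- A: filter falsy names, then branch on the count building each dict by hand.
-- Indices are guarded by the length tests, so getD is exact here.
def assign_player_names_py (candidates : List String) : List (String × String) :=
  let filtered := candidates.filter (fun candidate => candidate ≠ "")
  if filtered.length ≥ 3 then
    [("top_left", filtered.getD 0 ""), ("top_right", filtered.getD 1 ""), ("right", filtered.getD 2 "")]
  else if filtered.length = 2 then
    [("top_left", filtered.getD 0 ""), ("right", filtered.getD 1 "")]
  else if filtered.length = 1 then
    [("top_left", filtered.getD 0 "")]
  else []

-- ===== PORT B =====
-- B: one pass; the insertion-ordered dict (assoc list) is the loop state, 'break' = return.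
-- result[k] on the break path is guarded by the membership checks, so Dict.getD is exact.
def pvAssignLoop (result : PySem.Dict String String) : List String → PySem.Dict String String
  | [] => result
  | name :: rest =>
    if name = "" then pvAssignLoop result rest
    else if ¬ result.contains "top_left" then
      pvAssignLoop (result.insert "top_left" name) rest
    else if ¬ result.contains "right" then
      pvAssignLoop (result.insert "right" name) rest
    else
      (((PySem.Dict.empty.insert "top_left" (result.getD "top_left" "")).insert
          "top_right" (result.getD "right" "")).insert "right" name)

def assign_player_names_py_alt (candidates : List String) : List (String × String) :=
  (pvAssignLoop PySem.Dict.empty candidates).items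

-- ===== PRECONDITION & SPEC =====
def Spec_assign_player_names_py (candidates : List String) (out : List (String × String)) : Prop := out = assign_player_names_py_alt candidates
instance (candidates : List String) (out : List (String × String)) : Decidable (Spec_assign_player_names_py candidates out) := by unfold Spec_assign_player_names_py; infer_instance

-- ===== CLAIM (what is proved, stated in full; the proofs are below) =====
def Claim_equal_assign_player_names_py : Prop := ∀ (candidates : List String), Dom_assign_player_names_py candidates → Spec_assign_player_names_py candidates (assign_player_names_py candidates)

-- ===== LEMMAS AND PROOFS =====

-- state with both keys filled: the loop returns it unchanged, or rebuilds on the next kept name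
theorem pvLoop2 (cs : List String) (a b : String) :
    pvAssignLoop (PySem.Dict.mk [("top_left", a), ("right", b)]) cs =
      match cs.filter (fun c => c ≠ "") with
      | [] => PySem.Dict.mk [("top_left", a), ("right", b)]
      | c :: _ => PySem.Dict.mk [("top_left", a), ("top_right", b), ("right", c)] := by
  induction cs with
  | nil => rfl
  | cons name rest ih =>
      rw [List.filter_cons]
      by_cases h : name = ""
      · simpa [pvAssignLoop, h] using ih
      · simp [pvAssignLoop, h, PySem.Dict.contains, PySem.Dict.getD, PySem.Dict.get?,
              PySem.Dict.insert, PySem.Dict.empty]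

-- state with only "top_left": the result depends on the next zero, one or two kept names
theorem pvLoop1 (cs : List String) (a : String) :
    pvAssignLoop (PySem.Dict.mk [("top_left", a)]) cs =
      match cs.filter (fun c => c ≠ "") with
      | [] => PySem.Dict.mk [("top_left", a)]
      | [b] => PySem.Dict.mk [("top_left", a), ("right", b)]
      | b :: c :: _ => PySem.Dict.mk [("top_left", a), ("top_right", b), ("right", c)] := by
  induction cs with
  | nil => rfl
  | cons name rest ih =>
      rw [List.filter_cons]
      by_cases h : name = ""
      · simpa [pvAssignLoop, h] using ih
      · have hstep : pvAssignLoop (PySem.Dict.mk [("top_left", a)]) (name :: rest) =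
            pvAssignLoop (PySem.Dict.mk [("top_left", a), ("right", name)]) rest := by
          simp [pvAssignLoop, h, PySem.Dict.contains, PySem.Dict.insert]
        rw [hstep, pvLoop2]
        simp only [decide_not, ne_eq]
        cases rest.filter (fun c => !decide (c = "")) <;> simp [h]

-- empty state: full characterisation of the loop by the filtered list
theorem pvLoop0 (cs : List String) :
    pvAssignLoop PySem.Dict.empty cs =
      match cs.filter (fun c => c ≠ "") with
      | [] => PySem.Dict.empty
      | [a] => PySem.Dict.mk [("top_left", a)]
      | [a, b] => PySem.Dict.mk [("top_left", a), ("right", b)]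
      | a :: b :: c :: _ => PySem.Dict.mk [("top_left", a), ("top_right", b), ("right", c)] := by
  induction cs with
  | nil => rfl
  | cons name rest ih =>
      rw [List.filter_cons]
      by_cases h : name = ""
      · simpa [pvAssignLoop, h] using ih
      · have hstep : pvAssignLoop PySem.Dict.empty (name :: rest) =
            pvAssignLoop (PySem.Dict.mk [("top_left", name)]) rest := by
          simp [pvAssignLoop, h, PySem.Dict.contains,
                PySem.Dict.insert, PySem.Dict.empty]
        rw [hstep, pvLoop1]
        simp only [decide_not, ne_eq]
        cases hf : rest.filter (fun c => !decide (c = "")) with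
        | nil => simp [h]
        | cons b t => cases t <;> simp [h]

-- ===== VERDICT (by name: the statement is the Claim_ definition above) =====
theorem assign_player_names_py_spec : Claim_equal_assign_player_names_py := by
  intro candidates _
  unfold Spec_assign_player_names_py assign_player_names_py assign_player_names_py_alt
  rw [pvLoop0]
  cases hf : candidates.filter (fun c => c ≠ "") with
  | nil => simp [PySem.Dict.empty]
  | cons a t =>
      cases t with
      | nil => simp
      | cons b t' => cases t' <;> simp
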